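-- pv_equiv track=rewrite | github.com/HuangHsinTzu/1102-final-exam-public | exam/p/p05.py | p05
-- ===== SOURCE A (Python) =====
-- def p05(l1=[1,4,3,2,5,2], x=3):
--     output_list=None
--     # ↓程式區域↓
--     if(0 < x < 200):
--         l2 = []
--         l3 = []
--         for i in range(0,len(l1)):
--             if(l1[i] < x):
--                 l2.append(l1[i])
--             else:
--                 l3.append(l1[i])
--         l2.extend(l3)
--         output_list = l2
--     # ↑程式區域↑
--     return output_list
-- ===== SOURCE B (Python) =====
-- def p05(l1=[1,4,3,2,5,2], x=3):
--     # Same guard as A; stable partition delegated to Python's stable sort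
--     # keyed on the boolean v >= x (False sorts before True, ties keep order).
--     if not (0 < x < 200):
--         return None
--     return sorted(l1, key=lambda v: v >= x)
-- ===== Notes on version B (the rewrite author's own statement) =====
-- stated objective: idiomatic
-- what changed: A's explicit index loop filling two buckets and concatenating is replaced by a single call to Python's stable sort with the boolean key v >= x, which performs the same stable partition; same guard and None return.
import Mathlib
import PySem

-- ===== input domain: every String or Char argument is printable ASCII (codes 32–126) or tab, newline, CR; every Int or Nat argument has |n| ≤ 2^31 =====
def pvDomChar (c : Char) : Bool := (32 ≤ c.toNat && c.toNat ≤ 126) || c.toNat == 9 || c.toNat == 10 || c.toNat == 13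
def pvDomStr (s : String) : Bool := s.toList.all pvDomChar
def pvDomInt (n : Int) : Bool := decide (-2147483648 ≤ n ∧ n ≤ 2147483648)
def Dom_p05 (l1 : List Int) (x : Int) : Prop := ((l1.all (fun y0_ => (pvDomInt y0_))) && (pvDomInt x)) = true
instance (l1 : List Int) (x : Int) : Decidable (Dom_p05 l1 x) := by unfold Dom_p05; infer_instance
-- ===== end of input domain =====

-- ===== PORT A =====
-- B replaces A's two-bucket index loop by one call to the stable sort keyed on (v >= x); same guard; return-value equivalence.
def p05 (l1 : List Int) (x : Int) : Option (List Int) :=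
  if 0 < x ∧ x < 200 then
    let p := (PySem.List.pyRange 0 (l1.length : Int) 1).foldl
      (fun (acc : List Int × List Int) i =>
        if PySem.List.pyGetD l1 i 0 < x then (acc.1 ++ [PySem.List.pyGetD l1 i 0], acc.2)
        else (acc.1, acc.2 ++ [PySem.List.pyGetD l1 i 0])) ([], [])
    some (p.1 ++ p.2)
  else none

-- ===== PORT B =====
def p05_alt (l1 : List Int) (x : Int) : Option (List Int) :=
  if 0 < x ∧ x < 200 then
    some (PySem.List.sorted l1 (fun v => decide (x ≤ v)) false)
  else none

-- ===== PRECONDITION & SPEC =====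
def Spec_p05 (l1 : List Int) (x : Int) (out : Option (List Int)) : Prop := out = p05_alt l1 x
instance (l1 : List Int) (x : Int) (out : Option (List Int)) : Decidable (Spec_p05 l1 x out) := by unfold Spec_p05; infer_instance

-- ===== CLAIM (what is proved, stated in full; the proofs are below) =====
def Claim_equal_p05 : Prop := ∀ (l1 : List Int) (x : Int), Dom_p05 l1 x → Spec_p05 l1 x (p05 l1 x)

-- ===== LEMMAS AND PROOFS =====

-- A's loop computes (filter (<x), filter (≥x)) in its two buckets.
theorem partition_foldl (x : Int) (l : List Int) : ∀ (a b : List Int),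
    l.foldl (fun (acc : List Int × List Int) v =>
        if v < x then (acc.1 ++ [v], acc.2) else (acc.1, acc.2 ++ [v])) (a, b)
      = (a ++ l.filter (fun v => decide (v < x)), b ++ l.filter (fun v => decide (v ≥ x))) := by
  induction l with
  | nil => simp
  | cons h t ih =>
    intro a b
    by_cases hx : h < x
    · have hx' : ¬ h ≥ x := by omega
      simp [hx, hx', ih]
    · have hx' : h ≥ x := by omega
      simp [hx, hx', ih]

-- Inserting v < x into (small ++ big) appends it to the end of the small block.
theorem insertBy_lt (x v : Int) (hv : v < x) : ∀ (a b : List Int),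
    (∀ y ∈ a, y < x) → (∀ y ∈ b, x ≤ y) →
    PySem.List.insertBy (fun p q => decide ((decide (x ≤ p) : Bool) < (decide (x ≤ q) : Bool))) v (a ++ b)
      = a ++ v :: b := by
  intro a
  induction a with
  | nil =>
    intro b _ hb
    cases b with
    | nil => simp [PySem.List.insertBy]
    | cons y ys =>
      have hy : x ≤ y := hb y (by simp)
      have h1 : (decide (x ≤ v) : Bool) = false := by simp; omega
      have h2 : (decide (x ≤ y) : Bool) = true := by simpa using hy
      simp [PySem.List.insertBy, h1, h2]
  | cons a0 as ih =>
    intro b ha hb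
    have h0 : a0 < x := ha a0 (by simp)
    have h1 : (decide (x ≤ a0) : Bool) = false := by simp; omega
    have : ¬ ((decide (x ≤ v) : Bool) < (decide (x ≤ a0) : Bool)) := by
      simp [h1]
    simp [PySem.List.insertBy, this, ih b (fun y hy => ha y (by simp [hy])) hb]

-- Inserting v ≥ x appends it at the very end.
theorem insertBy_ge (x v : Int) (hv : x ≤ v) (l : List Int) :
    PySem.List.insertBy (fun p q => decide ((decide (x ≤ p) : Bool) < (decide (x ≤ q) : Bool))) v l
      = l ++ [v] := by
  apply PySem.List.insertBy_of_forall_not_before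
  intro y _
  have h1 : (decide (x ≤ v) : Bool) = true := by simpa using hv
  simp [h1]

-- Invariant of B's insertion sort: starting from small ++ big, folding l appends
-- its < x elements to the small block and its ≥ x elements to the big block.
theorem sort_partition (x : Int) (l : List Int) : ∀ (a b : List Int),
    (∀ y ∈ a, y < x) → (∀ y ∈ b, x ≤ y) →
    l.foldl (fun acc v =>
        PySem.List.insertBy (fun p q => decide ((decide (x ≤ p) : Bool) < (decide (x ≤ q) : Bool))) v acc)
      (a ++ b)
      = (a ++ l.filter (fun v => decide (v < x))) ++ (b ++ l.filter (fun v => decide (v ≥ x))) := by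
  induction l with
  | nil => intro a b _ _; simp
  | cons h t ih =>
    intro a b ha hb
    by_cases hx : h < x
    · have hx' : ¬ h ≥ x := by omega
      have step := insertBy_lt x h hx a b ha hb
      have ha' : ∀ y ∈ a ++ [h], y < x := by
        intro y hy; rcases List.mem_append.mp hy with hy | hy
        · exact ha y hy
        · simp at hy; omega
      have := ih (a ++ [h]) b ha' hb
      simp only [List.foldl_cons, step]
      rw [show a ++ h :: b = (a ++ [h]) ++ b by simp]
      rw [this]
      simp [hx, hx']
    · have hx' : h ≥ x := by omega
      have step := insertBy_ge x h (by omega) (a ++ b)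
      have hb' : ∀ y ∈ b ++ [h], x ≤ y := by
        intro y hy; rcases List.mem_append.mp hy with hy | hy
        · exact hb y hy
        · simp at hy; omega
      have := ih a (b ++ [h]) ha hb'
      simp only [List.foldl_cons, step]
      rw [show (a ++ b) ++ [h] = a ++ (b ++ [h]) by simp]
      rw [this]
      simp [hx, hx']

-- ===== VERDICT (by name: the statement is the Claim_ definition above) =====
theorem p05_spec : Claim_equal_p05 := by
  intro l1 x _
  unfold Spec_p05 p05 p05_alt
  by_cases h : 0 < x ∧ x < 200
  · rw [if_pos h, if_pos h]
    rw [PySem.List.foldl_pyRange_zero_pyGetD' l1 0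
      (fun (acc : List Int × List Int) v =>
        if v < x then (acc.1 ++ [v], acc.2) else (acc.1, acc.2 ++ [v])) ([], [])]
    rw [partition_foldl]
    rw [PySem.List.sorted_eq_foldl_insertBy]
    have := sort_partition x l1 [] [] (by simp) (by simp)
    simp only [List.nil_append] at this
    simp [this]
  · simp [h]
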